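-- pv_equiv track=rewrite | github.com/0817-Python-Algorithm/1Day1Algorithm | 98/ProgrammersAlgorithm/PebbleStone_72.py | solution
-- ===== SOURCE A (Python) =====
-- def solution(arr):
--     N = len(arr[0])
--     dp = [[0] * 4 for _ in range(N)]
--     dp[0] = [arr[0][0], arr[1][0], arr[2][0], arr[0][0] + arr[2][0]]
--
--     for i in range(1,N):
--         dp[i][0] = max(dp[i-1][1], dp[i-1][2]) + arr[0][i]
--         dp[i][1] = max(dp[i-1][0], dp[i-1][2], dp[i-1][3]) + arr[1][i]
--         dp[i][2] = max(dp[i-1][0], dp[i-1][1]) + arr[2][i]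
--         dp[i][3] = dp[i-1][1] + arr[0][i] + arr[2][i]
--
--     return max(dp[N-1])
-- ===== SOURCE B (Python) =====
-- # Divide-and-conquer over segment summaries: each segment of columns is summarised by a
-- # 4x4 max-plus matrix M[s][t] = best pebble path through the segment entering in state s
-- # and leaving in state t (None = impossible); segments are combined associatively through
-- # the allowed-transition pairs, and the answer is the best entry of the whole-array matrix.
-- _ADJ = [(0, 1), (0, 2), (1, 0), (1, 2), (1, 3), (2, 0), (2, 1), (3, 1)]
--
--
-- def _omax(a, b):
--     if a is None:
--         return b
--     if b is None:
--         return a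
--     return max(a, b)
--
--
-- def _oadd(a, b):
--     if a is None or b is None:
--         return None
--     return a + b
--
--
-- def _bmax(l):
--     r = None
--     for e in l:
--         r = _omax(r, e)
--     return r
--
--
-- def _single(c):
--     x, y, z = c
--     vals = [x, y, z, x + z]
--     return [[vals[s] if s == t else None for t in range(4)] for s in range(4)]
--
--
-- def _combine(L, R):
--     return [[_bmax([_oadd(L[s][u], R[v][t]) for (u, v) in _ADJ]) for t in range(4)]
--             for s in range(4)]
--
--
-- def _seg(cols, lo, hi):
--     if hi - lo == 1:
--         return _single(cols[lo])
--     mid = (lo + hi) // 2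
--     return _combine(_seg(cols, lo, mid), _seg(cols, mid, hi))
--
--
-- def solution(arr):
--     cols = list(zip(arr[0], arr[1], arr[2]))
--     M = _seg(cols, 0, len(cols))
--     return _bmax(e for row in M for e in row)
-- ===== Notes on version B (the rewrite author's own statement) =====
-- stated objective: alternative
-- what changed: Replaces A's left-to-right 4-state DP table with a divide-and-conquer algorithm: each column becomes a 4x4 max-plus segment matrix (None = impossible), halves are summarised recursively and merged with an associative combine over the allowed-transition pairs, and the answer is the best entry of the whole-array matrix.
import Mathlib
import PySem

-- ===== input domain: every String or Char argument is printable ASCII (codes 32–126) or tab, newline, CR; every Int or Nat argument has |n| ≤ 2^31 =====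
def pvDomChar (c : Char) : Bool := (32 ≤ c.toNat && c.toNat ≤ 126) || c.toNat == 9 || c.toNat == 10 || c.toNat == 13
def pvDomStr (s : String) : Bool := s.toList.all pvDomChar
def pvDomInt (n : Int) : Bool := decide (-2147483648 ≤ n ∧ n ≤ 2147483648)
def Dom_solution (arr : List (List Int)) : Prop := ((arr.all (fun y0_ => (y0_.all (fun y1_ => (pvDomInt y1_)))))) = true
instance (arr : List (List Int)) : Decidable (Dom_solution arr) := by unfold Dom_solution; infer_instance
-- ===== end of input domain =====

-- B replaces A's left-to-right 4-state DP table by a divide-and-conquer algorithm over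
-- 4x4 max-plus segment matrices (none = impossible) merged by an associative combine;
-- return values agree on Pre_ (alternative algorithm, similar cost).

-- ===== PORT A =====
-- Python's dp[i][j] = … assignments all read only dp[i-1], so the four sequential writes to
-- row i are transliterated as one List.set of the four values (exact).
-- range(1, N) over Nat N is List.range' 1 (N-1) (exact since Nat subtraction gives [] for N = 0).
def dpstepA (arr : List (List Int)) (dp : List (List Int)) (i : Nat) : List (List Int) :=
  let p := dp.getD (i-1) []
  dp.set i [max (p.getD 1 0) (p.getD 2 0) + (arr.getD 0 []).getD i 0,
            max (p.getD 0 0) (max (p.getD 2 0) (p.getD 3 0)) + (arr.getD 1 []).getD i 0,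
            max (p.getD 0 0) (p.getD 1 0) + (arr.getD 2 []).getD i 0,
            p.getD 1 0 + (arr.getD 0 []).getD i 0 + (arr.getD 2 []).getD i 0]

def solution (arr : List (List Int)) : Int :=
  let N := (arr.getD 0 []).length
  let dp : List (List Int) := (List.range N).map (fun _ => [0,0,0,0])
  let dp := dp.set 0 [(arr.getD 0 []).getD 0 0, (arr.getD 1 []).getD 0 0,
                     (arr.getD 2 []).getD 0 0,
                     (arr.getD 0 []).getD 0 0 + (arr.getD 2 []).getD 0 0]
  let dp := (List.range' 1 (N-1)).foldl (dpstepA arr) dp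
  (PySem.List.max? (dp.getD (N-1) []) (fun y => y)).getD 0

-- ===== PORT B =====
-- Matrix entries are Option Int with none = Python's None (-infinity); indexing L[s][u],
-- cols[lo] is always in range in B, ported as getD (exact there).
def ADJb : List (Nat × Nat) := [(0,1),(0,2),(1,0),(1,2),(1,3),(2,0),(2,1),(3,1)]

def omax (a b : Option Int) : Option Int :=
  match a, b with
  | none, b => b
  | some x, none => some x
  | some x, some y => some (max x y)

def oadd (a b : Option Int) : Option Int :=
  match a, b with
  | some x, some y => some (x + y)
  | _, _ => none

def bmaxO (l : List (Option Int)) : Option Int := l.foldl omax none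

def singleB (c : Int × Int × Int) : List (List (Option Int)) :=
  (List.range 4).map (fun s => (List.range 4).map (fun t =>
    if s == t then some (([c.1, c.2.1, c.2.2, c.1 + c.2.2] : List Int).getD s 0) else none))

def combineB (L R : List (List (Option Int))) : List (List (Option Int)) :=
  (List.range 4).map (fun s => (List.range 4).map (fun t =>
    bmaxO (ADJb.map (fun uv => oadd ((L.getD s []).getD uv.1 none) ((R.getD uv.2 []).getD t none)))))

-- Python tests 'hi - lo == 1' and diverges for hi ≤ lo; the guard 'hi ≤ lo + 1' and the
-- fuel hi - lo (enough for the halving recursion) only totalize that unreachable case (it needs cols = [], which Pre_ excludes).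
def segBF (fuel : Nat) (cols : List (Int × Int × Int)) (lo hi : Nat) : List (List (Option Int)) :=
  match fuel with
  | 0 => singleB (cols.getD lo (0,0,0))
  | fuel + 1 =>
    if hi ≤ lo + 1 then singleB (cols.getD lo (0,0,0))
    else combineB (segBF fuel cols lo ((lo+hi)/2)) (segBF fuel cols ((lo+hi)/2) hi)

def segB (cols : List (Int × Int × Int)) (lo hi : Nat) : List (List (Option Int)) :=
  segBF (hi - lo) cols lo hi

def solution_alt (arr : List (List Int)) : Int :=
  let cols := (arr.getD 0 []).zip ((arr.getD 1 []).zip (arr.getD 2 []))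
  let M := segB cols 0 cols.length
  -- Python returns the int _bmax yields; it is some _ whenever cols ≠ [] (getD 0 totalizes
  -- only the unreachable none case, outside Pre_).
  (bmaxO (M.flatMap (fun row => row))).getD 0

-- ===== PRECONDITION & SPEC =====
-- A raises IndexError unless there are at least 3 rows, row 0 is nonempty, and rows 1 and 2
-- are at least as long as row 0; Pre_ admits exactly the inputs on which A returns.
def Pre_solution (arr : List (List Int)) : Prop :=
  3 ≤ arr.length ∧ 0 < (arr.getD 0 []).length ∧
  (arr.getD 0 []).length ≤ (arr.getD 1 []).length ∧
  (arr.getD 0 []).length ≤ (arr.getD 2 []).length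
instance (arr : List (List Int)) : Decidable (Pre_solution arr) := by unfold Pre_solution; infer_instance
def pvWitness_solution : List (List Int) := [[1, 2], [3, 4], [5, 6]]
def Spec_solution (arr : List (List Int)) (out : Int) : Prop := out = solution_alt arr
instance (arr : List (List Int)) (out : Int) : Decidable (Spec_solution arr out) := by unfold Spec_solution; infer_instance

-- ===== CLAIM (what is proved, stated in full; the proofs are below) =====
def Claim_equal_solution : Prop := ∀ (arr : List (List Int)), Dom_solution arr → Pre_solution arr → Spec_solution arr (solution arr)


-- ===== LEMMAS AND PROOFS =====

-- A-side helpers: the rolling 4-tuple carried by A's table, and the column reader.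
def bstep (s : Int × Int × Int × Int) (c : Int × Int × Int) : Int × Int × Int × Int :=
  (max s.2.1 s.2.2.1 + c.1,
   max s.1 (max s.2.2.1 s.2.2.2) + c.2.1,
   max s.1 s.2.1 + c.2.2,
   s.2.1 + c.1 + c.2.2)

def tol (s : Int × Int × Int × Int) : List Int := [s.1, s.2.1, s.2.2.1, s.2.2.2]

def gcol (r0 r1 r2 : List Int) (i : Nat) : Int × Int × Int := (r0.getD i 0, r1.getD i 0, r2.getD i 0)

theorem getD_set_self {a : Type} (l : List a) (i : Nat) (v : a) (d : a) (h : i < l.length) :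
    (l.set i v).getD i d = v := by
  rw [List.getD_eq_getElem _ _ (by simpa using h)]
  simp

theorem cols_eq (r0 r1 r2 : List Int) (h1 : r0.length ≤ r1.length) (h2 : r0.length ≤ r2.length) :
    r0.zip (r1.zip r2) = (List.range r0.length).map (gcol r0 r1 r2) := by
  apply List.ext_getElem
  . simp; omega
  . intro i hi hi'
    simp at hi
    obtain ⟨ha, hb, hc⟩ := hi
    simp [gcol, List.getD, List.getElem?_eq_getElem ha, List.getElem?_eq_getElem hb,
      List.getElem?_eq_getElem hc]

theorem invA (arr : List (List Int)) :
    ∀ (m : Nat), m < (arr.getD 0 []).length ->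
    (((List.range' 1 m).foldl (dpstepA arr)
        (((List.range (arr.getD 0 []).length).map (fun _ => ([0,0,0,0] : List Int))).set 0
          [(arr.getD 0 []).getD 0 0, (arr.getD 1 []).getD 0 0, (arr.getD 2 []).getD 0 0,
           (arr.getD 0 []).getD 0 0 + (arr.getD 2 []).getD 0 0])).length = (arr.getD 0 []).length)
    ∧ ((List.range' 1 m).foldl (dpstepA arr)
        (((List.range (arr.getD 0 []).length).map (fun _ => ([0,0,0,0] : List Int))).set 0
          [(arr.getD 0 []).getD 0 0, (arr.getD 1 []).getD 0 0, (arr.getD 2 []).getD 0 0,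
           (arr.getD 0 []).getD 0 0 + (arr.getD 2 []).getD 0 0])).getD m []
      = tol ((List.range' 1 m).foldl (fun s i => bstep s (gcol (arr.getD 0 []) (arr.getD 1 []) (arr.getD 2 []) i))
          ((arr.getD 0 []).getD 0 0, (arr.getD 1 []).getD 0 0, (arr.getD 2 []).getD 0 0,
           (arr.getD 0 []).getD 0 0 + (arr.getD 2 []).getD 0 0)) := by
  intro m
  induction m with
  | zero =>
    intro hm
    refine ⟨by simp, ?_⟩
    rw [List.range'_zero]
    simp only [List.foldl_nil]
    rw [getD_set_self _ _ _ _ (by simpa using hm)]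
    rfl
  | succ m ih =>
    intro hm
    obtain ⟨ihl, ihv⟩ := ih (Nat.lt_of_succ_lt hm)
    rw [List.range'_concat, List.foldl_append, List.foldl_append,
        List.foldl_cons, List.foldl_nil, List.foldl_cons, List.foldl_nil]
    simp only [dpstepA, Nat.one_mul]
    have e : 1 + m - 1 = m := by omega
    have e2 : 1 + m = m + 1 := by omega
    rw [e, ihv, e2]
    refine ⟨by simpa using ihl, ?_⟩
    rw [getD_set_self _ _ _ _ (by rw [ihl]; omega)]
    simp [tol, bstep, gcol]

-- Option max-plus algebra
theorem omax_none_right (a : Option Int) : omax a none = a := by cases a <;> rfl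

theorem omax_assoc (a b c : Option Int) : omax (omax a b) c = omax a (omax b c) := by
  cases a <;> cases b <;> cases c <;> simp [omax, max_assoc]

theorem omax_comm (a b : Option Int) : omax a b = omax b a := by
  cases a <;> cases b <;> simp [omax, max_comm]

theorem oadd_none_right (a : Option Int) : oadd a none = none := by cases a <;> rfl

theorem oadd_none_left (a : Option Int) : oadd none a = none := by cases a <;> rfl

theorem oadd_assoc (a b c : Option Int) : oadd (oadd a b) c = oadd a (oadd b c) := by
  cases a <;> cases b <;> cases c <;> simp [oadd, Int.add_assoc]

theorem oadd_omax_right (a b c : Option Int) : oadd (omax a b) c = omax (oadd a c) (oadd b c) := by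
  cases a <;> cases b <;> cases c <;> simp [oadd, omax]

theorem oadd_omax_left (a b c : Option Int) : oadd a (omax b c) = omax (oadd a b) (oadd a c) := by
  cases a <;> cases b <;> cases c <;> simp [oadd, omax]

theorem foldl_omax_assoc (l : List (Option Int)) : ∀ (a b : Option Int),
    l.foldl omax (omax a b) = omax a (l.foldl omax b) := by
  induction l with
  | nil => intro a b; rfl
  | cons x l ih =>
    intro a b
    simp only [List.foldl_cons]
    rw [omax_assoc, ih]

theorem bmax_cons (x : Option Int) (l : List (Option Int)) : bmaxO (x :: l) = omax x (bmaxO l) := by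
  simp only [bmaxO, List.foldl_cons]
  have h : omax none x = omax x none := by cases x <;> rfl
  rw [h, foldl_omax_assoc]

theorem bmax_map_oadd_right (l : List Nat) (f : Nat → Option Int) (c : Option Int) :
    bmaxO (l.map (fun x => oadd (f x) c)) = oadd (bmaxO (l.map f)) c := by
  induction l with
  | nil => simp [bmaxO, oadd_none_left]
  | cons a l ih => simp only [List.map_cons, bmax_cons, ih, oadd_omax_right]

theorem bmax_map_oadd_leftP (l : List (Nat × Nat)) (f : Nat × Nat → Option Int) (c : Option Int) :
    bmaxO (l.map (fun x => oadd c (f x))) = oadd c (bmaxO (l.map f)) := by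
  induction l with
  | nil => simp [bmaxO, oadd_none_right]
  | cons a l ih => simp only [List.map_cons, bmax_cons, ih, oadd_omax_left]

theorem bmax_map_oadd_rightP (l : List (Nat × Nat)) (f : Nat × Nat → Option Int) (c : Option Int) :
    bmaxO (l.map (fun x => oadd (f x) c)) = oadd (bmaxO (l.map f)) c := by
  induction l with
  | nil => simp [bmaxO, oadd_none_left]
  | cons a l ih => simp only [List.map_cons, bmax_cons, ih, oadd_omax_right]

theorem bmax_map_omaxP (l : List (Nat × Nat)) (f g : Nat × Nat → Option Int) :
    bmaxO (l.map (fun y => omax (f y) (g y))) = omax (bmaxO (l.map f)) (bmaxO (l.map g)) := by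
  induction l with
  | nil => rfl
  | cons a l ih =>
    simp only [List.map_cons, bmax_cons, ih]
    rw [omax_assoc, omax_assoc]
    congr 1
    rw [← omax_assoc, ← omax_assoc, omax_comm (bmaxO (l.map f)) (g a)]

theorem bmax_map_const_noneP (l : List (Nat × Nat)) : bmaxO (l.map (fun _ => (none : Option Int))) = none := by
  induction l with
  | nil => rfl
  | cons a l ih => simp only [List.map_cons, bmax_cons, ih]; rfl

-- swap of a double max: rows over Nat, columns over pairs
theorem bmax_swap (l : List Nat) (m : List (Nat × Nat)) (f : Nat → Nat × Nat → Option Int) :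
    bmaxO (l.map (fun x => bmaxO (m.map (f x)))) = bmaxO (m.map (fun y => bmaxO (l.map (fun x => f x y)))) := by
  induction l with
  | nil =>
    show bmaxO [] = bmaxO (m.map (fun _ => (none : Option Int)))
    rw [bmax_map_const_noneP]
    rfl
  | cons a l ih =>
    simp only [List.map_cons, bmax_cons, ih]
    rw [← bmax_map_omaxP]

theorem bmax_swapP (l m : List (Nat × Nat)) (f : Nat × Nat → Nat × Nat → Option Int) :
    bmaxO (l.map (fun x => bmaxO (m.map (f x)))) = bmaxO (m.map (fun y => bmaxO (l.map (fun x => f x y)))) := by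
  induction l with
  | nil =>
    show bmaxO [] = bmaxO (m.map (fun _ => (none : Option Int)))
    rw [bmax_map_const_noneP]
    rfl
  | cons a l ih =>
    simp only [List.map_cons, bmax_cons, ih]
    rw [← bmax_map_omaxP]

theorem bmax_flatMap (l : List (List (Option Int))) :
    bmaxO (l.flatMap (fun r => r)) = bmaxO (l.map (fun r => bmaxO r)) := by
  induction l with
  | nil => rfl
  | cons a l ih =>
    simp only [List.flatMap_cons, List.map_cons, bmax_cons, ← ih]
    induction a with
    | nil => rfl
    | cons x a iha =>
      simp only [List.cons_append, bmax_cons, iha, omax_assoc]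

theorem getD_map_range {a : Type} (n : Nat) (f : Nat → a) (s : Nat) (h : s < n) (d : a) :
    ((List.range n).map f).getD s d = f s := by
  rw [List.getD_eq_getElem _ _ (by simpa using h)]
  simp

theorem adj_lt : ∀ uv ∈ ADJb, uv.1 < 4 ∧ uv.2 < 4 := by decide

theorem singleB_eq (c : Int × Int × Int) :
    singleB c = [[some c.1, none, none, none], [none, some c.2.1, none, none],
                 [none, none, some c.2.2, none], [none, none, none, some (c.1 + c.2.2)]] := by
  rfl

-- column max of a matrix (max over entry rows s of column t)
def colm (M : List (List (Option Int))) (t : Nat) : Option Int :=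
  bmaxO ((List.range 4).map (fun s => (M.getD s []).getD t none))

theorem colm_combine (M S : List (List (Option Int))) (t : Nat) (ht : t < 4) :
    colm (combineB M S) t
      = bmaxO (ADJb.map (fun uv => oadd (colm M uv.1) ((S.getD uv.2 []).getD t none))) := by
  unfold colm
  have h1 : ((List.range 4).map (fun s => ((combineB M S).getD s []).getD t none))
      = (List.range 4).map (fun s => bmaxO (ADJb.map (fun uv =>
          oadd ((M.getD s []).getD uv.1 none) ((S.getD uv.2 []).getD t none)))) := by
    apply List.map_congr_left
    intro s hs
    rw [List.mem_range] at hs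
    rw [show combineB M S = (List.range 4).map (fun s => (List.range 4).map (fun t =>
      bmaxO (ADJb.map (fun uv => oadd ((M.getD s []).getD uv.1 none) ((S.getD uv.2 []).getD t none))))) from rfl]
    rw [getD_map_range _ _ _ hs, getD_map_range _ _ _ ht]
  rw [h1, bmax_swap]
  apply congrArg
  apply List.map_congr_left
  intro uv _
  rw [bmax_map_oadd_right]

theorem combine_assoc (A B C : List (List (Option Int))) :
    combineB (combineB A B) C = combineB A (combineB B C) := by
  show (List.range 4).map _ = (List.range 4).map _
  apply List.map_congr_left
  intro s hs
  rw [List.mem_range] at hs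
  apply List.map_congr_left
  intro t ht
  rw [List.mem_range] at ht
  have hL : (ADJb.map (fun uv => oadd (((combineB A B).getD s []).getD uv.1 none) ((C.getD uv.2 []).getD t none)))
      = ADJb.map (fun uv => bmaxO (ADJb.map (fun pq =>
          oadd (oadd ((A.getD s []).getD pq.1 none) ((B.getD pq.2 []).getD uv.1 none)) ((C.getD uv.2 []).getD t none)))) := by
    apply List.map_congr_left
    intro uv huv
    obtain ⟨hu, _⟩ := adj_lt uv huv
    rw [show combineB A B = (List.range 4).map (fun s => (List.range 4).map (fun u =>
      bmaxO (ADJb.map (fun pq => oadd ((A.getD s []).getD pq.1 none) ((B.getD pq.2 []).getD u none))))) from rfl]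
    rw [getD_map_range _ _ _ hs, getD_map_range _ _ _ hu]
    rw [← bmax_map_oadd_rightP]
  have hR : (ADJb.map (fun pq => oadd ((A.getD s []).getD pq.1 none) (((combineB B C).getD pq.2 []).getD t none)))
      = ADJb.map (fun pq => bmaxO (ADJb.map (fun uv =>
          oadd ((A.getD s []).getD pq.1 none) (oadd ((B.getD pq.2 []).getD uv.1 none) ((C.getD uv.2 []).getD t none))))) := by
    apply List.map_congr_left
    intro pq hpq
    obtain ⟨_, hq⟩ := adj_lt pq hpq
    rw [show combineB B C = (List.range 4).map (fun q => (List.range 4).map (fun t =>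
      bmaxO (ADJb.map (fun uv => oadd ((B.getD q []).getD uv.1 none) ((C.getD uv.2 []).getD t none))))) from rfl]
    rw [getD_map_range _ _ _ hq, getD_map_range _ _ _ ht]
    rw [← bmax_map_oadd_leftP]
  show bmaxO _ = bmaxO _
  rw [hL, hR, bmax_swapP]
  apply congrArg
  apply List.map_congr_left
  intro uv _
  apply congrArg
  apply List.map_congr_left
  intro pq _
  rw [oadd_assoc]

-- the left-to-right product of per-column matrices (proof-side view of B)
def stepB (m : List (List (Option Int))) (c : Int × Int × Int) : List (List (Option Int)) :=
  combineB m (singleB c)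

def mprodNE (l : List (Int × Int × Int)) : List (List (Option Int)) :=
  l.tail.foldl stepB (singleB (l.headD (0,0,0)))

theorem foldl_stepB_combine (l : List (Int × Int × Int)) :
    ∀ M N, l.foldl stepB (combineB M N) = combineB M (l.foldl stepB N) := by
  induction l with
  | nil => intro M N; rfl
  | cons c l ih =>
    intro M N
    simp only [List.foldl_cons]
    rw [show stepB (combineB M N) c = combineB (combineB M N) (singleB c) from rfl,
        combine_assoc, ih]
    rfl

theorem mprod_append (a : Int × Int × Int) (t1 : List (Int × Int × Int)) (b : Int × Int × Int) (t2 : List (Int × Int × Int)) :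
    mprodNE ((a :: t1) ++ (b :: t2)) = combineB (mprodNE (a :: t1)) (mprodNE (b :: t2)) := by
  show ((t1 ++ b :: t2).foldl stepB (singleB a)) = _
  rw [List.foldl_append, List.foldl_cons]
  rw [show stepB (t1.foldl stepB (singleB a)) b = combineB (t1.foldl stepB (singleB a)) (singleB b) from rfl]
  rw [foldl_stepB_combine]
  rfl

theorem seg_eq (cols : List (Int × Int × Int)) :
    ∀ (k lo hi : Nat), hi - lo ≤ k → lo < hi → hi ≤ cols.length ->
    segBF k cols lo hi = mprodNE ((cols.drop lo).take (hi - lo)) := by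
  intro k
  induction k with
  | zero => intro lo hi hk hlt _; omega
  | succ k ih =>
    intro lo hi hk hlt hle
    rw [segBF]
    by_cases hb : hi ≤ lo + 1
    . rw [if_pos hb]
      have he : hi = lo + 1 := by omega
      have hlo : lo < cols.length := by omega
      rw [he, List.drop_eq_getElem_cons hlo]
      have : lo + 1 - lo = 1 := by omega
      rw [this, List.take_succ_cons, List.take_zero]
      rw [List.getD_eq_getElem _ _ hlo]
      rfl
    . rw [if_neg hb]
      have hm1 : lo < (lo + hi) / 2 := by omega
      have hm2 : (lo + hi) / 2 < hi := by omega
      rw [ih lo ((lo+hi)/2) (by omega) hm1 (by omega),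
          ih ((lo+hi)/2) hi (by omega) hm2 hle]
      have hsplit : (cols.drop lo).take (hi - lo)
          = (cols.drop lo).take ((lo+hi)/2 - lo) ++ (cols.drop ((lo+hi)/2)).take (hi - (lo+hi)/2) := by
        rw [show hi - lo = ((lo+hi)/2 - lo) + (hi - (lo+hi)/2) by omega, List.take_add]
        congr 1
        rw [List.drop_drop, show lo + ((lo+hi)/2 - lo) = (lo+hi)/2 by omega]
      rw [hsplit]
      have hne1 : (cols.drop lo).take ((lo+hi)/2 - lo) ≠ [] := by
        apply List.ne_nil_of_length_pos
        simp only [List.length_take, List.length_drop]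
        omega
      have hne2 : (cols.drop ((lo+hi)/2)).take (hi - (lo+hi)/2) ≠ [] := by
        apply List.ne_nil_of_length_pos
        simp only [List.length_take, List.length_drop]
        omega
      obtain ⟨a, t1, h1⟩ := List.exists_cons_of_ne_nil hne1
      obtain ⟨b, t2, h2⟩ := List.exists_cons_of_ne_nil hne2
      rw [h1, h2, mprod_append]


theorem omax_none_left (b : Option Int) : omax none b = b := rfl

theorem omax_some_some (x y : Int) : omax (some x) (some y) = some (max x y) := rfl

theorem oadd_some_some (x y : Int) : oadd (some x) (some y) = some (x + y) := rfl

theorem bmaxO_nil : bmaxO [] = none := rfl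

-- per-state step lemmas: colm of a combine with a single-column matrix
theorem colm_step0 (M : List (List (Option Int))) (c : Int × Int × Int) (f : Int × Int × Int × Int)
    (h1 : colm M 1 = some f.2.1) (h2 : colm M 2 = some f.2.2.1) :
    colm (stepB M c) 0 = some (max f.2.1 f.2.2.1 + c.1) := by
  rw [show stepB M c = combineB M (singleB c) from rfl, colm_combine M _ 0 (by omega)]
  simp only [ADJb, List.map_cons, List.map_nil, singleB_eq]
  simp only [List.getD_cons_zero, List.getD_cons_succ]
  rw [h1, h2]
  simp only [oadd_none_right, oadd_some_some, bmax_cons, bmaxO_nil, omax_none_left,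
    omax_none_right, omax_some_some, Option.some.injEq]
  omega

theorem colm_step1 (M : List (List (Option Int))) (c : Int × Int × Int) (f : Int × Int × Int × Int)
    (h0 : colm M 0 = some f.1) (h2 : colm M 2 = some f.2.2.1) (h3 : colm M 3 = some f.2.2.2) :
    colm (stepB M c) 1 = some (max f.1 (max f.2.2.1 f.2.2.2) + c.2.1) := by
  rw [show stepB M c = combineB M (singleB c) from rfl, colm_combine M _ 1 (by omega)]
  simp only [ADJb, List.map_cons, List.map_nil, singleB_eq]
  simp only [List.getD_cons_zero, List.getD_cons_succ]
  rw [h0, h2, h3]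
  simp only [oadd_none_right, oadd_some_some, bmax_cons, bmaxO_nil, omax_none_left,
    omax_none_right, omax_some_some, Option.some.injEq]
  omega

theorem colm_step2 (M : List (List (Option Int))) (c : Int × Int × Int) (f : Int × Int × Int × Int)
    (h0 : colm M 0 = some f.1) (h1 : colm M 1 = some f.2.1) :
    colm (stepB M c) 2 = some (max f.1 f.2.1 + c.2.2) := by
  rw [show stepB M c = combineB M (singleB c) from rfl, colm_combine M _ 2 (by omega)]
  simp only [ADJb, List.map_cons, List.map_nil, singleB_eq]
  simp only [List.getD_cons_zero, List.getD_cons_succ]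
  rw [h0, h1]
  simp only [oadd_none_right, oadd_some_some, bmax_cons, bmaxO_nil, omax_none_left,
    omax_none_right, omax_some_some, Option.some.injEq]
  omega

theorem colm_step3 (M : List (List (Option Int))) (c : Int × Int × Int) (f : Int × Int × Int × Int)
    (h1 : colm M 1 = some f.2.1) :
    colm (stepB M c) 3 = some (f.2.1 + c.1 + c.2.2) := by
  rw [show stepB M c = combineB M (singleB c) from rfl, colm_combine M _ 3 (by omega)]
  simp only [ADJb, List.map_cons, List.map_nil, singleB_eq]
  simp only [List.getD_cons_zero, List.getD_cons_succ]
  rw [h1]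
  simp only [oadd_none_right, oadd_some_some, bmax_cons, bmaxO_nil, omax_none_left,
    omax_none_right, omax_some_some, Option.some.injEq]
  omega

theorem foldB (rest : List (Int × Int × Int)) :
    ∀ (M : List (List (Option Int))) (f : Int × Int × Int × Int),
    colm M 0 = some f.1 → colm M 1 = some f.2.1 → colm M 2 = some f.2.2.1 → colm M 3 = some f.2.2.2 ->
    (colm (rest.foldl stepB M) 0 = some (rest.foldl bstep f).1
     ∧ colm (rest.foldl stepB M) 1 = some (rest.foldl bstep f).2.1
     ∧ colm (rest.foldl stepB M) 2 = some (rest.foldl bstep f).2.2.1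
     ∧ colm (rest.foldl stepB M) 3 = some (rest.foldl bstep f).2.2.2) := by
  induction rest with
  | nil => intro M f h0 h1 h2 h3; exact ⟨h0, h1, h2, h3⟩
  | cons c rest ih =>
    intro M f h0 h1 h2 h3
    simp only [List.foldl_cons]
    exact ih (stepB M c) (bstep f c)
      (colm_step0 M c f h1 h2) (colm_step1 M c f h0 h2 h3)
      (colm_step2 M c f h0 h1) (colm_step3 M c f h1)


theorem bmax_map_omaxN (l : List Nat) (f g : Nat → Option Int) :
    bmaxO (l.map (fun y => omax (f y) (g y))) = omax (bmaxO (l.map f)) (bmaxO (l.map g)) := by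
  induction l with
  | nil => rfl
  | cons a l ih =>
    simp only [List.map_cons, bmax_cons, ih]
    rw [omax_assoc, omax_assoc]
    congr 1
    rw [← omax_assoc, ← omax_assoc, omax_comm (bmaxO (l.map f)) (g a)]

theorem bmax_map_const_noneN (l : List Nat) : bmaxO (l.map (fun _ => (none : Option Int))) = none := by
  induction l with
  | nil => rfl
  | cons a l ih => simp only [List.map_cons, bmax_cons, ih]; rfl

theorem bmax_swap_nat (l m : List Nat) (f : Nat → Nat → Option Int) :
    bmaxO (l.map (fun x => bmaxO (m.map (f x)))) = bmaxO (m.map (fun y => bmaxO (l.map (fun x => f x y)))) := by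
  induction l with
  | nil =>
    show bmaxO [] = bmaxO (m.map (fun _ => (none : Option Int)))
    rw [bmax_map_const_noneN]
    rfl
  | cons a l ih =>
    simp only [List.map_cons, bmax_cons, ih]
    rw [← bmax_map_omaxN]

-- the matrices B builds all have the 4x4 map-over-range shape
def matShape (f : Nat → Nat → Option Int) : List (List (Option Int)) :=
  (List.range 4).map (fun s => (List.range 4).map (f s))

theorem combine_shape (M N : List (List (Option Int))) :
    combineB M N = matShape (fun s t =>
      bmaxO (ADJb.map (fun uv => oadd ((M.getD s []).getD uv.1 none) ((N.getD uv.2 []).getD t none)))) := rfl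

theorem single_shape (c : Int × Int × Int) :
    singleB c = matShape (fun s t =>
      if s == t then some (([c.1, c.2.1, c.2.2, c.1 + c.2.2] : List Int).getD s 0) else none) := rfl

theorem fold_shape (rest : List (Int × Int × Int)) :
    ∀ (M : List (List (Option Int))), (∃ f, M = matShape f) →
    ∃ f, rest.foldl stepB M = matShape f := by
  induction rest with
  | nil => intro M h; exact h
  | cons c rest ih =>
    intro M _
    simp only [List.foldl_cons]
    exact ih (stepB M c) ⟨_, combine_shape M (singleB c)⟩

theorem colm_shape (f : Nat → Nat → Option Int) (t : Nat) (ht : t < 4) :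
    colm (matShape f) t = bmaxO ((List.range 4).map (fun s => f s t)) := by
  unfold colm
  apply congrArg
  apply List.map_congr_left
  intro s hs
  rw [List.mem_range] at hs
  rw [show matShape f = (List.range 4).map (fun s => (List.range 4).map (f s)) from rfl]
  rw [getD_map_range _ _ _ hs, getD_map_range _ _ _ ht]

theorem flatten_colm (f : Nat → Nat → Option Int) :
    bmaxO ((matShape f).flatMap (fun r => r))
      = bmaxO [colm (matShape f) 0, colm (matShape f) 1, colm (matShape f) 2, colm (matShape f) 3] := by
  rw [bmax_flatMap]
  rw [show (matShape f).map (fun r => bmaxO r)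
      = (List.range 4).map (fun s => bmaxO ((List.range 4).map (f s))) from rfl]
  rw [bmax_swap_nat]
  rw [colm_shape f 0 (by omega), colm_shape f 1 (by omega), colm_shape f 2 (by omega),
      colm_shape f 3 (by omega)]
  rfl

-- B's value on an explicit nonempty column list
theorem B_val_list (c0 : Int × Int × Int) (rest : List (Int × Int × Int)) :
    bmaxO ((mprodNE (c0 :: rest)).flatMap (fun r => r))
      = some ((fun g => max (max (max g.1 g.2.1) g.2.2.1) g.2.2.2)
          (rest.foldl bstep (c0.1, c0.2.1, c0.2.2, c0.1 + c0.2.2))) := by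
  have hM : mprodNE (c0 :: rest) = rest.foldl stepB (singleB c0) := rfl
  obtain ⟨f, hf⟩ := fold_shape rest (singleB c0) ⟨_, single_shape c0⟩
  obtain ⟨d0, d1, d2, d3⟩ := foldB rest (singleB c0)
    (c0.1, c0.2.1, c0.2.2, c0.1 + c0.2.2) rfl rfl rfl rfl
  rw [hf] at d0 d1 d2 d3
  rw [hM, hf, flatten_colm, d0, d1, d2, d3]
  rfl

-- B's value, reduced to the same rolling tuple A maintains
theorem altVal (arr : List (List Int)) (hpre : Pre_solution arr) :
    solution_alt arr
      = (fun g => max (max (max g.1 g.2.1) g.2.2.1) g.2.2.2)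
          (((List.range' 1 ((arr.getD 0 []).length - 1)).map (gcol (arr.getD 0 []) (arr.getD 1 []) (arr.getD 2 []))).foldl bstep
            ((arr.getD 0 []).getD 0 0, (arr.getD 1 []).getD 0 0, (arr.getD 2 []).getD 0 0,
             (arr.getD 0 []).getD 0 0 + (arr.getD 2 []).getD 0 0)) := by
  obtain ⟨h3, hN, h1, h2⟩ := hpre
  simp only [solution_alt]
  rw [cols_eq _ _ _ h1 h2]
  set r0 := arr.getD 0 [] with hr0
  set r1 := arr.getD 1 [] with hr1
  set r2 := arr.getD 2 [] with hr2
  set cl := (List.range r0.length).map (gcol r0 r1 r2) with hcl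
  have hlen : cl.length = r0.length := by simp [hcl]
  have hr : cl = gcol r0 r1 r2 0 :: (List.range' 1 (r0.length - 1)).map (gcol r0 r1 r2) := by
    rw [hcl]
    obtain ⟨k, hk⟩ : ∃ k, r0.length = k + 1 := ⟨_, (Nat.succ_pred_eq_of_pos hN).symm⟩
    rw [hk, List.range_eq_range', List.range'_succ]
    simp
  rw [show segB cl 0 cl.length = segBF (cl.length - 0) cl 0 cl.length from rfl]
  rw [seg_eq cl (cl.length - 0) 0 cl.length (by omega) (by omega) (le_refl _)]
  rw [List.drop_zero, Nat.sub_zero, List.take_length]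
  rw [hr, B_val_list]
  rfl

-- ===== VERDICT (by name: the statement is the Claim_ definition above) =====
theorem solution_spec : Claim_equal_solution := by
  intro arr _ hpre
  unfold Spec_solution
  rw [altVal arr hpre]
  obtain ⟨h3, hN, h1, h2⟩ := hpre
  simp only [solution]
  obtain ⟨-, hv⟩ := invA arr ((arr.getD 0 []).length - 1) (by omega)
  rw [hv]
  rw [List.foldl_map]
  simp only [tol]
  rw [PySem.List.max?_id_cons]
  simp only [Option.getD_some, List.foldl_cons, List.foldl_nil]
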